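-- pv_equiv track=rewrite | github.com/leihchen/leetcode | mac/main.py | student_imbal
-- ===== SOURCE A (Python) =====
-- def student_imbal(nums):
--     n = len(nums)
--     res = 0
--     for i in range(n):
--         min_, max_ = nums[i], nums[i]
--         for j in range(i+1, n):
--             min_ = min(min_, nums[j])
--             max_ = max(max_, nums[j])
--             res += j - i < max_ - min_
--     return res
-- ===== SOURCE B (Python) =====
-- def student_imbal(nums):
--     n = len(nums)
--     # sparse tables: mx[k][i] = max(nums[i:i+2**k]), mn[k][i] = min(nums[i:i+2**k])
--     mx = [nums[:]]
--     mn = [nums[:]]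
--     k = 1
--     while (1 << k) <= n:
--         h = 1 << (k - 1)
--         mx.append([max(mx[k - 1][i], mx[k - 1][i + h]) for i in range(n - (1 << k) + 1)])
--         mn.append([min(mn[k - 1][i], mn[k - 1][i + h]) for i in range(n - (1 << k) + 1)])
--         k += 1
--     res = 0
--     for i in range(n):
--         for j in range(i + 1, n):
--             k = (j - i + 1).bit_length() - 1
--             h = 1 << k
--             big = max(mx[k][i], mx[k][j + 1 - h])
--             small = min(mn[k][i], mn[k][j + 1 - h])
--             res += j - i < big - small
--     return res
-- ===== Notes on version B (the rewrite author's own statement) =====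
-- stated objective: alternative
-- what changed: Replaces A's running min/max accumulators in the inner loop by precomputed sparse tables (power-of-two window extrema), answering each subarray's max/min as a range query over two overlapping blocks; it trades A's per-pair incremental state for an O(n log n) table plus O(1) queries.
import Mathlib
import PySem

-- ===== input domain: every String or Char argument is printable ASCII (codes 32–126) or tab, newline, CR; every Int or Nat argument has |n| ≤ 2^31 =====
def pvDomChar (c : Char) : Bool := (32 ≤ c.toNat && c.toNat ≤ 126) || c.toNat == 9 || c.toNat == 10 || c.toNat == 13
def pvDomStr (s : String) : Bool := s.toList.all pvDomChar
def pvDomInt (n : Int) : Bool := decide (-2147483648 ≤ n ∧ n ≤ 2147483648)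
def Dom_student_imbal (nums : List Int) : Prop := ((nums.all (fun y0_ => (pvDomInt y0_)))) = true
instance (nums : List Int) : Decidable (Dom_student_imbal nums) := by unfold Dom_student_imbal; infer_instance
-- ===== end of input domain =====

-- B replaces A's running min/max accumulators by precomputed sparse tables (range-min/max
-- queries answered from two overlapping power-of-two blocks); an alternative algorithm of
-- the same O(n^2) counting cost.

-- ===== PORT A =====
def student_imbal (nums : List Int) : Int :=
  let n : Int := nums.length
  (PySem.List.pyRange 0 n 1).foldl
    (fun res i =>
      let v := PySem.List.pyGetD nums i 0
      ((PySem.List.pyRange (i + 1) n 1).foldl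
        (fun (st : Int × Int × Int) j =>
          let mn := min st.1 (PySem.List.pyGetD nums j 0)
          let mx := max st.2.1 (PySem.List.pyGetD nums j 0)
          (mn, mx, st.2.2 + if j - i < mx - mn then 1 else 0))
        (v, v, res)).2.2)
    0

-- ===== PORT B =====
-- the `while (1 << k) <= n` loop of Source B building both sparse-table row lists
-- (1 << k is written 2 ^ k, exact since k ≥ 0; termination: 2 ^ k grows past n)
def pvBuild (n : Int) (mx mn : List (List Int)) (k : Nat) : List (List Int) × List (List Int) :=
  if hguard : (2 : Int) ^ k ≤ n then
    let h : Int := 2 ^ (k - 1)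
    let prevmax := PySem.List.pyGetD mx ((k : Int) - 1) []
    let prevmin := PySem.List.pyGetD mn ((k : Int) - 1) []
    let newmax := (PySem.List.pyRange 0 (n - 2 ^ k + 1) 1).map
      (fun i => max (PySem.List.pyGetD prevmax i 0) (PySem.List.pyGetD prevmax (i + h) 0))
    let newmin := (PySem.List.pyRange 0 (n - 2 ^ k + 1) 1).map
      (fun i => min (PySem.List.pyGetD prevmin i 0) (PySem.List.pyGetD prevmin (i + h) 0))
    pvBuild n (mx ++ [newmax]) (mn ++ [newmin]) (k + 1)
  else (mx, mn)
termination_by (n + 1 - 2 ^ k).toNat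
decreasing_by
  have h2 : (0 : Int) < 2 ^ k := by positivity
  omega

def student_imbal_alt (nums : List Int) : Int :=
  let n : Int := nums.length
  let tbl := pvBuild n [PySem.List.slice nums none none] [PySem.List.slice nums none none] 1
  (PySem.List.pyRange 0 n 1).foldl
    (fun res i =>
      (PySem.List.pyRange (i + 1) n 1).foldl
        (fun res j =>
          -- (j - i + 1).bit_length() - 1 = Nat.log2 of the (positive) window length: exact for j > i
          let k := Nat.log2 (j - i + 1).toNat
          let h : Int := 2 ^ k
          let big := max (PySem.List.pyGetD (PySem.List.pyGetD tbl.1 (k : Int) []) i 0)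
                         (PySem.List.pyGetD (PySem.List.pyGetD tbl.1 (k : Int) []) (j + 1 - h) 0)
          let small := min (PySem.List.pyGetD (PySem.List.pyGetD tbl.2 (k : Int) []) i 0)
                           (PySem.List.pyGetD (PySem.List.pyGetD tbl.2 (k : Int) []) (j + 1 - h) 0)
          res + if j - i < big - small then 1 else 0)
        res)
    0

-- ===== PRECONDITION & SPEC =====
def Spec_student_imbal (nums : List Int) (out : Int) : Prop := out = student_imbal_alt nums
instance (nums : List Int) (out : Int) : Decidable (Spec_student_imbal nums out) := by unfold Spec_student_imbal; infer_instance

-- ===== CLAIM (what is proved, stated in full; the proofs are below) =====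
def Claim_equal_student_imbal : Prop := ∀ (nums : List Int), Dom_student_imbal nums → Spec_student_imbal nums (student_imbal nums)

-- ===== LEMMAS AND PROOFS =====

/-- min of a nonempty list as a running fold (0 on []). -/
def sMin : List Int → Int
  | [] => 0
  | x :: t => t.foldl min x

/-- max of a nonempty list as a running fold (0 on []). -/
def sMax : List Int → Int
  | [] => 0
  | x :: t => t.foldl max x

theorem sMax_mem (s : List Int) (h : s ≠ []) : sMax s ∈ s := by
  cases s with
  | nil => exact absurd rfl h
  | cons x t =>
      simp only [sMax]
      rcases PySem.List.foldl_max_mem t x with h1 | h1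
      · rw [h1]; exact List.mem_cons_self
      · exact List.mem_cons_of_mem _ h1

theorem le_sMax (s : List Int) (x : Int) (hx : x ∈ s) : x ≤ sMax s := by
  cases s with
  | nil => simp at hx
  | cons y t =>
      simp only [sMax]
      rcases List.mem_cons.mp hx with rfl | h
      · exact (PySem.List.le_foldl_max t x).1
      · exact (PySem.List.le_foldl_max t y).2 x h

theorem sMin_mem (s : List Int) (h : s ≠ []) : sMin s ∈ s := by
  cases s with
  | nil => exact absurd rfl h
  | cons x t =>
      simp only [sMin]
      rcases PySem.List.foldl_min_mem t x with h1 | h1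
      · rw [h1]; exact List.mem_cons_self
      · exact List.mem_cons_of_mem _ h1

theorem sMin_le (s : List Int) (x : Int) (hx : x ∈ s) : sMin s ≤ x := by
  cases s with
  | nil => simp at hx
  | cons y t =>
      simp only [sMin]
      rcases List.mem_cons.mp hx with rfl | h
      · exact (PySem.List.foldl_min_le t x).1
      · exact (PySem.List.foldl_min_le t y).2 x h

theorem sMin_snoc (xs : List Int) (y : Int) (h : xs ≠ []) :
    sMin (xs ++ [y]) = min (sMin xs) y := by
  cases xs with
  | nil => exact absurd rfl h
  | cons x t => simp [sMin, List.foldl_append]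

theorem sMax_snoc (xs : List Int) (y : Int) (h : xs ≠ []) :
    sMax (xs ++ [y]) = max (sMax xs) y := by
  cases xs with
  | nil => exact absurd rfl h
  | cons x t => simp [sMax, List.foldl_append]

theorem slice_snoc (nums : List Int) (a b : Int) (ha : 0 ≤ a) (hab : a ≤ b)
    (hb : b < (nums.length : Int)) :
    PySem.List.slice nums (some a) (some (b + 1))
      = PySem.List.slice nums (some a) (some b) ++ [PySem.List.pyGetD nums b 0] := by
  have hb0 : (0 : Int) ≤ b := le_trans ha hab
  have hbn : b.toNat < nums.length := by omega
  rw [PySem.List.slice_toNat nums ha hb0,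
      PySem.List.slice_toNat nums ha (by omega : (0:Int) ≤ b + 1)]
  have h1 : (b + 1).toNat - a.toNat = (b.toNat - a.toNat) + 1 := by omega
  rw [h1, List.take_add_one]
  congr 1
  have hidx : b.toNat - a.toNat < (nums.drop a.toNat).length := by
    simp [List.length_drop]; omega
  rw [List.getElem?_eq_getElem hidx, List.getElem_drop]
  rw [PySem.List.pyGetD_eq_getElem nums 0 hb0 hb]
  have hix : a.toNat + (b.toNat - a.toNat) = b.toNat := by omega
  simp [hix]

theorem slice_self (nums : List Int) (a : Int) (ha : 0 ≤ a) :
    PySem.List.slice nums (some a) (some a) = [] := by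
  rw [PySem.List.slice_toNat nums ha ha]
  simp

theorem slice_one (nums : List Int) (i : Int) (hi : 0 ≤ i) (hin : i < (nums.length : Int)) :
    PySem.List.slice nums (some i) (some (i + 1)) = [PySem.List.pyGetD nums i 0] := by
  rw [slice_snoc nums i i hi le_rfl hin, slice_self nums i hi]; rfl

theorem slice_ne_nil (nums : List Int) (a b : Int) (ha : 0 ≤ a) (hab : a ≤ b)
    (hb : b < (nums.length : Int)) :
    PySem.List.slice nums (some a) (some (b + 1)) ≠ [] := by
  rw [slice_snoc nums a b ha hab hb]
  simp

theorem slice_nonempty (nums : List Int) (a c : Int) (ha : 0 ≤ a) (hac : a < c)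
    (hc : c ≤ (nums.length : Int)) :
    PySem.List.slice nums (some a) (some c) ≠ [] := by
  have h := slice_ne_nil nums a (c - 1) ha (by omega) (by omega)
  have hc' : c - 1 + 1 = c := by omega
  rwa [hc'] at h

theorem slice_split (nums : List Int) (a b c : Int) (ha : 0 ≤ a) (hab : a ≤ b) (hbc : b ≤ c) :
    PySem.List.slice nums (some a) (some c)
      = PySem.List.slice nums (some a) (some b) ++ PySem.List.slice nums (some b) (some c) := by
  have hb : (0 : Int) ≤ b := le_trans ha hab
  have hc : (0 : Int) ≤ c := le_trans hb hbc
  rw [PySem.List.slice_toNat nums ha hc, PySem.List.slice_toNat nums ha hb,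
      PySem.List.slice_toNat nums hb hc]
  have h1 : c.toNat - a.toNat = (b.toNat - a.toNat) + (c.toNat - b.toNat) := by omega
  rw [h1, List.take_add, List.drop_drop]
  have h3 : a.toNat + (b.toNat - a.toNat) = b.toNat := by omega
  rw [h3]

theorem sMax_union (nums : List Int) (a b c d : Int) (h0 : 0 ≤ a) (hab : a ≤ b) (hbc : b ≤ c)
    (hcd : c ≤ d) (hac : a < c) (hbd : b < d) (hd : d ≤ (nums.length : Int)) :
    max (sMax (PySem.List.slice nums (some a) (some c)))
        (sMax (PySem.List.slice nums (some b) (some d)))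
      = sMax (PySem.List.slice nums (some a) (some d)) := by
  have hb0 : (0 : Int) ≤ b := le_trans h0 hab
  have hcl : c ≤ (nums.length : Int) := le_trans hcd hd
  have hne_ac := slice_nonempty nums a c h0 hac hcl
  have hne_bd := slice_nonempty nums b d hb0 hbd hd
  have hne_ad := slice_nonempty nums a d h0 (lt_of_lt_of_le hac hcd) hd
  apply le_antisymm
  · apply max_le
    · apply le_sMax
      rw [slice_split nums a c d h0 hac.le hcd]
      exact List.mem_append_left _ (sMax_mem _ hne_ac)
    · apply le_sMax
      rw [slice_split nums a b d h0 hab (le_trans hbc hcd)]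
      exact List.mem_append_right _ (sMax_mem _ hne_bd)
  · have hmem := sMax_mem _ hne_ad
    nth_rewrite 1 [slice_split nums a b d h0 hab (le_trans hbc hcd)] at hmem
    rcases List.mem_append.mp hmem with h | h
    · refine le_trans ?_ (le_max_left _ _)
      apply le_sMax
      rw [slice_split nums a b c h0 hab hbc]
      exact List.mem_append_left _ h
    · exact le_trans (le_sMax _ _ h) (le_max_right _ _)

theorem sMin_union (nums : List Int) (a b c d : Int) (h0 : 0 ≤ a) (hab : a ≤ b) (hbc : b ≤ c)
    (hcd : c ≤ d) (hac : a < c) (hbd : b < d) (hd : d ≤ (nums.length : Int)) :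
    min (sMin (PySem.List.slice nums (some a) (some c)))
        (sMin (PySem.List.slice nums (some b) (some d)))
      = sMin (PySem.List.slice nums (some a) (some d)) := by
  have hb0 : (0 : Int) ≤ b := le_trans h0 hab
  have hcl : c ≤ (nums.length : Int) := le_trans hcd hd
  have hne_ac := slice_nonempty nums a c h0 hac hcl
  have hne_bd := slice_nonempty nums b d hb0 hbd hd
  have hne_ad := slice_nonempty nums a d h0 (lt_of_lt_of_le hac hcd) hd
  apply le_antisymm
  · have hmem := sMin_mem _ hne_ad
    nth_rewrite 1 [slice_split nums a b d h0 hab (le_trans hbc hcd)] at hmem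
    rcases List.mem_append.mp hmem with h | h
    · refine le_trans (min_le_left _ _) ?_
      apply sMin_le
      rw [slice_split nums a b c h0 hab hbc]
      exact List.mem_append_left _ h
    · exact le_trans (min_le_right _ _) (sMin_le _ _ h)
  · apply le_min
    · apply sMin_le
      rw [slice_split nums a c d h0 hac.le hcd]
      exact List.mem_append_left _ (sMin_mem _ hne_ac)
    · apply sMin_le
      rw [slice_split nums a b d h0 hab (le_trans hbc hcd)]
      exact List.mem_append_right _ (sMin_mem _ hne_bd)

/-- Both sparse-table rows p hold the slice extrema of the 2^p-windows. -/
def RowOK (nums : List Int) (mx mn : List (List Int)) (p : Nat) : Prop :=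
  ∀ i : Int, 0 ≤ i → i + 2 ^ p ≤ (nums.length : Int) →
    PySem.List.pyGetD (PySem.List.pyGetD mx (p : Int) []) i 0
      = sMax (PySem.List.slice nums (some i) (some (i + 2 ^ p))) ∧
    PySem.List.pyGetD (PySem.List.pyGetD mn (p : Int) []) i 0
      = sMin (PySem.List.slice nums (some i) (some (i + 2 ^ p)))

theorem getRow_append_lt (rows : List (List Int)) (r : List Int) (p : Nat)
    (hp : p < rows.length) :
    PySem.List.pyGetD (rows ++ [r]) (p : Int) [] = PySem.List.pyGetD rows (p : Int) [] := by
  simp only [PySem.List.pyGetD_natCast]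
  rw [List.getD_append _ _ _ _ hp]

theorem getRow_append_self (rows : List (List Int)) (r : List Int) (p : Nat)
    (hp : p = rows.length) :
    PySem.List.pyGetD (rows ++ [r]) (p : Int) [] = r := by
  subst hp
  simp only [PySem.List.pyGetD_natCast]
  rw [List.getD_eq_getElem?_getD, List.getElem?_append_right le_rfl]
  simp

theorem pvBuild_spec (nums : List Int) : ∀ (k : Nat) (mx mn : List (List Int)),
    1 ≤ k → mx.length = k → mn.length = k →
    (∀ p : Nat, p < k → RowOK nums mx mn p) →
    ∀ p : Nat, (2 : Int) ^ p ≤ (nums.length : Int) →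
      RowOK nums (pvBuild (nums.length : Int) mx mn k).1 (pvBuild (nums.length : Int) mx mn k).2 p := by
  intro k mx mn
  fun_induction pvBuild (nums.length : Int) mx mn k with
  | case1 mx mn k hguard h prevmax prevmin newmax newmin ih =>
      intro hk hlx hln hrows p hp
      apply ih (by omega) (by simp [hlx]) (by simp [hln]) _ p hp
      -- the extended tables still satisfy the row invariant
      intro q hq
      have hpow : (2 : Int) ^ k = 2 ^ (k - 1) + 2 ^ (k - 1) := by
        have hk1 : k - 1 + 1 = k := by omega
        conv_lhs => rw [← hk1]
        rw [pow_succ]; ring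
      have hpos : (0 : Int) < 2 ^ (k - 1) := by positivity
      by_cases hqk : q < k
      · intro i hi hin
        rw [getRow_append_lt mx newmax q (by omega), getRow_append_lt mn newmin q (by omega)]
        exact hrows q hqk i hi hin
      · have hqe : q = k := by omega
        subst hqe
        intro i hi hin
        rw [getRow_append_self mx newmax q (by omega), getRow_append_self mn newmin q (by omega)]
        have hnewmax : newmax = (PySem.List.pyRange 0 ((nums.length : Int) - 2 ^ q + 1) 1).map
            (fun i => max (PySem.List.pyGetD prevmax i 0) (PySem.List.pyGetD prevmax (i + h) 0)) := rfl
        have hnewmin : newmin = (PySem.List.pyRange 0 ((nums.length : Int) - 2 ^ q + 1) 1).map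
            (fun i => min (PySem.List.pyGetD prevmin i 0) (PySem.List.pyGetD prevmin (i + h) 0)) := rfl
        have hprevmax : prevmax = PySem.List.pyGetD mx ((q : Int) - 1) [] := rfl
        have hprevmin : prevmin = PySem.List.pyGetD mn ((q : Int) - 1) [] := rfl
        have hh : h = 2 ^ (q - 1) := rfl
        have hcast : (q : Int) - 1 = ((q - 1 : Nat) : Int) := by omega
        have hr1 := hrows (q - 1) (by omega) i hi (by omega)
        have hr2 := hrows (q - 1) (by omega) (i + 2 ^ (q - 1)) (by omega) (by omega)
        rw [hnewmax, hnewmin,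
            PySem.List.pyGetD_map_pyRange_of_nonneg _ _ _ _ hi (by omega),
            PySem.List.pyGetD_map_pyRange_of_nonneg _ _ _ _ hi (by omega),
            hprevmax, hprevmin, hh, hcast]
        rw [hr1.1, hr1.2, hr2.1, hr2.2]
        have hsum : i + 2 ^ (q - 1) + 2 ^ (q - 1) = i + 2 ^ q := by omega
        rw [hsum]
        constructor
        · exact sMax_union nums i (i + 2 ^ (q - 1)) (i + 2 ^ (q - 1)) (i + 2 ^ q)
            hi (by omega) le_rfl (by omega) (by omega) (by omega) (by omega)
        · exact sMin_union nums i (i + 2 ^ (q - 1)) (i + 2 ^ (q - 1)) (i + 2 ^ q)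
            hi (by omega) le_rfl (by omega) (by omega) (by omega) (by omega)
  | case2 mx mn k hguard =>
      intro hk hlx hln hrows p hp
      by_cases hpk : p < k
      · exact hrows p hpk
      · exfalso
        exact hguard (le_trans (pow_le_pow_right₀ (by norm_num) (by omega)) hp)


theorem rows_ok (nums : List Int) :
    ∀ p : Nat, (2 : Int) ^ p ≤ (nums.length : Int) →
      RowOK nums (pvBuild (nums.length : Int) [nums] [nums] 1).1
                 (pvBuild (nums.length : Int) [nums] [nums] 1).2 p := by
  apply pvBuild_spec nums 1 [nums] [nums] le_rfl rfl rfl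
  intro p hp i hi hin
  interval_cases p
  have h1 : (2 : Int) ^ (0 : Nat) = 1 := by norm_num
  rw [h1] at hin ⊢
  constructor <;>
  · show PySem.List.pyGetD nums i 0 = _
    rw [slice_one nums i hi (by omega)]
    rfl

/-- the table query returns the slice extrema. -/
theorem query_ok (nums : List Int) (i j : Int) (hi : 0 ≤ i) (hij : i < j)
    (hj : j < (nums.length : Int)) :
    (max (PySem.List.pyGetD (PySem.List.pyGetD
            (pvBuild (nums.length : Int) [nums] [nums] 1).1
            ((Nat.log2 (j - i + 1).toNat : Nat) : Int) []) i 0)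
         (PySem.List.pyGetD (PySem.List.pyGetD
            (pvBuild (nums.length : Int) [nums] [nums] 1).1
            ((Nat.log2 (j - i + 1).toNat : Nat) : Int) []) (j + 1 - 2 ^ Nat.log2 (j - i + 1).toNat) 0)
       = sMax (PySem.List.slice nums (some i) (some (j + 1)))) ∧
    (min (PySem.List.pyGetD (PySem.List.pyGetD
            (pvBuild (nums.length : Int) [nums] [nums] 1).2
            ((Nat.log2 (j - i + 1).toNat : Nat) : Int) []) i 0)
         (PySem.List.pyGetD (PySem.List.pyGetD
            (pvBuild (nums.length : Int) [nums] [nums] 1).2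
            ((Nat.log2 (j - i + 1).toNat : Nat) : Int) []) (j + 1 - 2 ^ Nat.log2 (j - i + 1).toNat) 0)
       = sMin (PySem.List.slice nums (some i) (some (j + 1)))) := by
  have hLt : ((j - i + 1).toNat : Int) = j - i + 1 := Int.toNat_of_nonneg (by omega)
  have hne : (j - i + 1).toNat ≠ 0 := by omega
  have hlow : (2 : Nat) ^ Nat.log2 (j - i + 1).toNat ≤ (j - i + 1).toNat := Nat.log2_self_le hne
  have hhigh : (j - i + 1).toNat < 2 ^ (Nat.log2 (j - i + 1).toNat + 1) := Nat.lt_log2_self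
  have hlowI : (2 : Int) ^ Nat.log2 (j - i + 1).toNat ≤ j - i + 1 := by
    have := (Nat.cast_le (α := Int)).mpr hlow
    rw [hLt] at this; push_cast at this; exact this
  have hhighI : j - i + 1 < 2 * 2 ^ Nat.log2 (j - i + 1).toNat := by
    have := (Nat.cast_lt (α := Int)).mpr hhigh
    rw [hLt] at this; push_cast at this
    calc j - i + 1 < (2:Int) ^ (Nat.log2 (j - i + 1).toNat + 1) := this
      _ = 2 * 2 ^ Nat.log2 (j - i + 1).toNat := by ring
  have hpos : (0 : Int) < 2 ^ Nat.log2 (j - i + 1).toNat := by positivity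
  have hpn : (2 : Int) ^ Nat.log2 (j - i + 1).toNat ≤ (nums.length : Int) := by omega
  have rows := rows_ok nums (Nat.log2 (j - i + 1).toNat) hpn
  have r1 := rows i hi (by omega)
  have r2 := rows (j + 1 - 2 ^ Nat.log2 (j - i + 1).toNat) (by omega) (by omega)
  have hsum : j + 1 - 2 ^ Nat.log2 (j - i + 1).toNat + 2 ^ Nat.log2 (j - i + 1).toNat = j + 1 := by
    ring
  rw [hsum] at r2
  constructor
  · rw [r1.1, r2.1]
    exact sMax_union nums i (j + 1 - 2 ^ Nat.log2 (j - i + 1).toNat)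
      (i + 2 ^ Nat.log2 (j - i + 1).toNat) (j + 1)
      hi (by omega) (by omega) (by omega) (by omega) (by omega) (by omega)
  · rw [r1.2, r2.2]
    exact sMin_union nums i (j + 1 - 2 ^ Nat.log2 (j - i + 1).toNat)
      (i + 2 ^ Nat.log2 (j - i + 1).toNat) (j + 1)
      hi (by omega) (by omega) (by omega) (by omega) (by omega) (by omega)


/-- A's inner loop computes the slice extrema and accumulates the 0/1 sum. -/
theorem inner_loop (nums : List Int) (i : Int) (hi : 0 ≤ i) (hin : i < (nums.length : Int))
    (b : Int) (hib : i + 1 ≤ b) (hb : b ≤ (nums.length : Int)) :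
    ∀ res : Int,
    (PySem.List.pyRange (i + 1) b 1).foldl
      (fun (st : Int × Int × Int) j =>
        let mn := min st.1 (PySem.List.pyGetD nums j 0)
        let mx := max st.2.1 (PySem.List.pyGetD nums j 0)
        (mn, mx, st.2.2 + if j - i < mx - mn then 1 else 0))
      (PySem.List.pyGetD nums i 0, PySem.List.pyGetD nums i 0, res)
    = (sMin (PySem.List.slice nums (some i) (some b)),
       sMax (PySem.List.slice nums (some i) (some b)),
       res + ((PySem.List.pyRange (i + 1) b 1).map (fun j =>
         if j - i < sMax (PySem.List.slice nums (some i) (some (j + 1)))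
                    - sMin (PySem.List.slice nums (some i) (some (j + 1)))
         then (1 : Int) else 0)).sum) := by
  induction b, hib using Int.le_induction with
  | base =>
      intro res
      rw [PySem.List.pyRange_one_eq_nil (by omega)]
      have hsl := slice_one nums i hi hin
      simp [hsl, sMin, sMax]
  | succ b hib ih =>
      intro res
      have hb' : b ≤ (nums.length : Int) := by omega
      have hbn : b < (nums.length : Int) := by omega
      have hib' : i ≤ b := by omega
      have hne : PySem.List.slice nums (some i) (some b) ≠ [] := by
        have := slice_ne_nil nums i (b - 1) hi (by omega) (by omega)
        simpa using this
      have hsl := slice_snoc nums i b hi hib' hbn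
      rw [PySem.List.pyRange_one_succ_right (by omega), List.foldl_append, ih hb' res,
          List.map_append, List.sum_append]
      simp only [List.foldl_cons, List.foldl_nil, List.map_cons, List.map_nil, List.sum_cons,
        List.sum_nil, add_zero]
      rw [hsl, sMin_snoc _ _ hne, sMax_snoc _ _ hne]
      simp only [Prod.mk.injEq]
      exact ⟨trivial, trivial, by ring⟩

-- ===== VERDICT (by name: the statement is the Claim_ definition above) =====
theorem student_imbal_spec : Claim_equal_student_imbal := by
  intro nums _
  unfold Spec_student_imbal student_imbal student_imbal_alt
  simp only [PySem.List.slice_none_none]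
  set n : Int := (nums.length : Int) with hn
  -- A's side: rewrite the outer body via the inner-loop lemma
  rw [PySem.List.foldl_congr_mem
      (g := fun res i => res + ((PySem.List.pyRange (i + 1) n 1).map (fun j =>
        if j - i < sMax (PySem.List.slice nums (some i) (some (j + 1)))
                   - sMin (PySem.List.slice nums (some i) (some (j + 1)))
        then (1 : Int) else 0)).sum)
      (h := by
        intro res i hmem
        have hi := (PySem.List.mem_pyRange_one.mp hmem)
        rw [inner_loop nums i hi.1 hi.2 n (by omega) (by omega) res])]
  -- B's side: rewrite the inner loop into the same per-i sum via the table queries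
  rw [PySem.List.foldl_congr_mem
      (f := fun res i =>
        (PySem.List.pyRange (i + 1) n 1).foldl
          (fun res j =>
            res + if j - i <
              max (PySem.List.pyGetD (PySem.List.pyGetD
                     (pvBuild n [nums] [nums] 1).1 ((Nat.log2 (j - i + 1).toNat : Nat) : Int) []) i 0)
                  (PySem.List.pyGetD (PySem.List.pyGetD
                     (pvBuild n [nums] [nums] 1).1 ((Nat.log2 (j - i + 1).toNat : Nat) : Int) [])
                     (j + 1 - 2 ^ Nat.log2 (j - i + 1).toNat) 0)
              - min (PySem.List.pyGetD (PySem.List.pyGetD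
                     (pvBuild n [nums] [nums] 1).2 ((Nat.log2 (j - i + 1).toNat : Nat) : Int) []) i 0)
                  (PySem.List.pyGetD (PySem.List.pyGetD
                     (pvBuild n [nums] [nums] 1).2 ((Nat.log2 (j - i + 1).toNat : Nat) : Int) [])
                     (j + 1 - 2 ^ Nat.log2 (j - i + 1).toNat) 0)
            then (1 : Int) else 0)
          res)
      (g := fun res i => res + ((PySem.List.pyRange (i + 1) n 1).map (fun j =>
        if j - i < sMax (PySem.List.slice nums (some i) (some (j + 1)))
                   - sMin (PySem.List.slice nums (some i) (some (j + 1)))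
        then (1 : Int) else 0)).sum)
      (h := by
        intro res i hmem
        have hi := (PySem.List.mem_pyRange_one.mp hmem)
        beta_reduce
        rw [PySem.List.foldl_add]
        congr 1
        apply congrArg List.sum
        apply List.map_congr_left
        intro j hjmem
        have hj := PySem.List.mem_pyRange_one.mp hjmem
        have hq := query_ok nums i j hi.1 (by omega) (by omega)
        rw [hq.1, hq.2])]
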